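-- pv_equiv track=rewrite | github.com/YapJiaHao/ICT-2205 | ICT2205A/main.py | validate_passphrase
-- ===== SOURCE A (Python) =====
-- def validate_passphrase(passphrase):
--     # Check length
--     if len(passphrase) < 8:
--         return False
--     # Check for uppercase letter
--     if not any(char.isupper() for char in passphrase):
--         return False
--     # Check for lowercase letter
--     if not any(char.islower() for char in passphrase):
--         return False
--     # Check for number
--     if not any(char.isdigit() for char in passphrase):
--         return False
--     # Check for special character
--     special_chars = "!@#$%^&*()_+-=[]{}|;:,.<>/?"
--     if not any(char in special_chars for char in passphrase):
--         return False
--     return True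
-- ===== SOURCE B (Python) =====
-- def validate_passphrase(passphrase):
--     special_chars = "!@#$%^&*()_+-=[]{}|;:,.<>/?"
--     has_upper = has_lower = has_digit = has_special = False
--     for char in passphrase:
--         if char.isupper():
--             has_upper = True
--         if char.islower():
--             has_lower = True
--         if char.isdigit():
--             has_digit = True
--         if char in special_chars:
--             has_special = True
--     return len(passphrase) >= 8 and has_upper and has_lower and has_digit and has_special
-- ===== Notes on version B (the rewrite author's own statement) =====
-- stated objective: alternative
-- what changed: Replaces A's five sequential passes (length check plus four separate any() scans) with a single loop that accumulates four boolean flags and one final conjunction.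
import Mathlib
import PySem

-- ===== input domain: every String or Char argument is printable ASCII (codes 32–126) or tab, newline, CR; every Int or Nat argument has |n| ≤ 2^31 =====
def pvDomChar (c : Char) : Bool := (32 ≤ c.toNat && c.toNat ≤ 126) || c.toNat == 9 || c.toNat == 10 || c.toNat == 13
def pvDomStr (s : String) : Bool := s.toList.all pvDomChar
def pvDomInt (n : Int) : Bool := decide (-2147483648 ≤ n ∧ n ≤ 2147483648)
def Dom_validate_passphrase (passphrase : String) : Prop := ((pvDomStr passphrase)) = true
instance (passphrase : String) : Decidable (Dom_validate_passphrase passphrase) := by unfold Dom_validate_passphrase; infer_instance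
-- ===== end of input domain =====

-- B replaces A's early-return chain of four separate any() scans by one single-pass
-- loop accumulating four flags and a final conjunction (objective: alternative decomposition).

def pvSpecialChars : List Char := "!@#$%^&*()_+-=[]{}|;:,.<>/?".toList

-- ===== PORT A =====
def validate_passphrase (passphrase : String) : Bool :=
  -- Check length
  if PySem.Str.len passphrase < 8 then false
  -- Check for uppercase letter
  else if !(passphrase.toList.any (fun c => PySem.Chars.isupper c)) then false
  -- Check for lowercase letter
  else if !(passphrase.toList.any (fun c => PySem.Chars.islower c)) then false
  -- Check for number
  else if !(passphrase.toList.any (fun c => PySem.Chars.isdigit c)) then false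
  -- Check for special character
  else if !(passphrase.toList.any (fun c => pvSpecialChars.contains c)) then false
  else true

-- ===== PORT B =====
def validate_passphrase_alt (passphrase : String) : Bool :=
  let flags := passphrase.toList.foldl
    (fun (s : Bool × Bool × Bool × Bool) c =>
      ((if PySem.Chars.isupper c then true else s.1),
       (if PySem.Chars.islower c then true else s.2.1),
       (if PySem.Chars.isdigit c then true else s.2.2.1),
       (if pvSpecialChars.contains c then true else s.2.2.2)))
    (false, false, false, false)
  decide (8 ≤ PySem.Str.len passphrase) && flags.1 && flags.2.1 && flags.2.2.1 && flags.2.2.2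

-- ===== PRECONDITION & SPEC =====
def Spec_validate_passphrase (passphrase : String) (out : Bool) : Prop := out = validate_passphrase_alt passphrase
instance (passphrase : String) (out : Bool) : Decidable (Spec_validate_passphrase passphrase out) := by unfold Spec_validate_passphrase; infer_instance

-- ===== CLAIM (what is proved, stated in full; the proofs are below) =====
def Claim_equal_validate_passphrase : Prop := ∀ (passphrase : String), Dom_validate_passphrase passphrase → Spec_validate_passphrase passphrase (validate_passphrase passphrase)

-- ===== LEMMAS AND PROOFS =====
theorem flags_foldl (l : List Char) (s : Bool × Bool × Bool × Bool) :
    l.foldl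
      (fun (s : Bool × Bool × Bool × Bool) c =>
        ((if PySem.Chars.isupper c then true else s.1),
         (if PySem.Chars.islower c then true else s.2.1),
         (if PySem.Chars.isdigit c then true else s.2.2.1),
         (if pvSpecialChars.contains c then true else s.2.2.2))) s
    = (s.1 || l.any (fun c => PySem.Chars.isupper c),
       s.2.1 || l.any (fun c => PySem.Chars.islower c),
       s.2.2.1 || l.any (fun c => PySem.Chars.isdigit c),
       s.2.2.2 || l.any (fun c => pvSpecialChars.contains c)) := by
  induction l generalizing s with
  | nil => simp
  | cons c t ih =>
    simp only [List.foldl_cons, ih, List.any_cons]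
    obtain ⟨a, b, d, e⟩ := s
    by_cases h1 : PySem.Chars.isupper c <;>
    by_cases h2 : PySem.Chars.islower c <;>
    by_cases h3 : PySem.Chars.isdigit c <;>
    by_cases h4 : pvSpecialChars.contains c <;>
    simp [h1, h2, h3, Bool.or_assoc, Bool.or_comm]

theorem decide_not_any_mem (l S : List Char) :
    decide (∀ x ∈ l, x ∉ S) = !l.any (fun c => decide (c ∈ S)) := by
  induction l with
  | nil => simp
  | cons c t ih => by_cases h : c ∈ S <;> simp [h, ih]

-- ===== VERDICT (by name: the statement is the Claim_ definition above) =====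
theorem validate_passphrase_spec : Claim_equal_validate_passphrase := by
  intro p _
  unfold Spec_validate_passphrase validate_passphrase validate_passphrase_alt
  simp only [flags_foldl, Bool.false_or]
  by_cases hlen : PySem.Str.len p < 8
  · rw [if_pos hlen, decide_eq_false (by omega : ¬ (8 : Int) ≤ PySem.Str.len p)]
    simp
  · rw [if_neg hlen, decide_eq_true (by omega : (8 : Int) ≤ PySem.Str.len p), Bool.true_and]
    by_cases h1 : (p.toList.any (fun c => PySem.Chars.isupper c)) = true <;>
    by_cases h2 : (p.toList.any (fun c => PySem.Chars.islower c)) = true <;>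
    by_cases h3 : (p.toList.any (fun c => PySem.Chars.isdigit c)) = true <;>
    by_cases h4 : (p.toList.any (fun c => pvSpecialChars.contains c)) = true <;>
    simp [h1, h2, h3, decide_not_any_mem]
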